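-- pv_equiv track=rewrite | github.com/aditya-armal/Data-Structures-Problem-Statements | MaxMod/solution.py | solve
-- ===== SOURCE A (Python) =====
-- def solve(A, n1):
--     maxMod = 0
--
--     for i in range(n1):
--         for j in range(i + 1, n1):
--             if A[i] != 0 or A[j] != 0:
--                 currentMod = A[i] % A[j] if A[j] > A[i] else A[j] % A[i]
--                 if currentMod > maxMod:
--                     maxMod = currentMod
--
--     return maxMod
-- ===== SOURCE B (Python) =====
-- def solve(A, n1):
--     L = A[:n1] if n1 > 0 else []
--     if len(L) < 2:
--         return 0
--     M = max(L)
--     if M <= 0: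
--         return 0
--     return max(x % M for x in L)
-- ===== Notes on version B (the rewrite author's own statement) =====
-- stated objective: faster
-- what changed: Replaced the O(n^2) all-pairs modulo scan by a single pass: the answer is max(x % M) over the first n1 elements where M is their maximum (0 if fewer than 2 elements or M <= 0), since every pair value smaller%larger is dominated by some x%M.
import Mathlib
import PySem

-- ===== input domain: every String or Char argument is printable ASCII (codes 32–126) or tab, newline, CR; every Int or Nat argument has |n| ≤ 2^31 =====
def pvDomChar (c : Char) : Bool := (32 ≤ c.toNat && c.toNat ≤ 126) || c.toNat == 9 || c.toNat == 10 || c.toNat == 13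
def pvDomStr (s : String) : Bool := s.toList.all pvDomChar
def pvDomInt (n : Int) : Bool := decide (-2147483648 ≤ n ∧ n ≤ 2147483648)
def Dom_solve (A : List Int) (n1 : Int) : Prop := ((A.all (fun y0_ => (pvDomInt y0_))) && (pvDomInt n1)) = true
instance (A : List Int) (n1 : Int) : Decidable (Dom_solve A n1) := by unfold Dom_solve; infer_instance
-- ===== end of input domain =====

-- B replaces A's O(n^2) all-pairs modulo scan by a single pass over the prefix: answer = max(x % M)
-- over the first n1 elements, M their maximum (0 if fewer than two elements or M ≤ 0).

-- ===== PORT A =====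
def solve (A : List Int) (n1 : Int) : Int :=
  (PySem.List.pyRange 0 n1 1).foldl (fun maxMod i =>
    (PySem.List.pyRange (i + 1) n1 1).foldl (fun maxMod j =>
      if PySem.List.pyGetD A i 0 ≠ 0 ∨ PySem.List.pyGetD A j 0 ≠ 0 then
        let currentMod :=
          if PySem.List.pyGetD A j 0 > PySem.List.pyGetD A i 0 then
            PySem.Int.mod (PySem.List.pyGetD A i 0) (PySem.List.pyGetD A j 0)
          else
            PySem.Int.mod (PySem.List.pyGetD A j 0) (PySem.List.pyGetD A i 0)
        if currentMod > maxMod then currentMod else maxMod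
      else maxMod) maxMod) 0

-- ===== PORT B =====
def solve_alt (A : List Int) (n1 : Int) : Int :=
  let L := if n1 > 0 then PySem.List.slice A none (some n1) else []
  if L.length < 2 then 0
  else
    let M := (PySem.List.max? L (fun y => y)).getD 0
    if M ≤ 0 then 0
    else (PySem.List.max? (L.map (fun x => PySem.Int.mod x M)) (fun y => y)).getD 0

-- ===== PRECONDITION & SPEC =====
-- Pre_ excludes exactly the inputs where A raises: n1 > len(A) (IndexError) and prefixes containing
-- both 0 and a negative number (ZeroDivisionError from `x % 0`).
def Pre_solve (A : List Int) (n1 : Int) : Prop :=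
  n1 ≤ (A.length : Int) ∧ ((0 : Int) ∈ A.take n1.toNat → ∀ x ∈ A.take n1.toNat, 0 ≤ x)
instance (A : List Int) (n1 : Int) : Decidable (Pre_solve A n1) := by unfold Pre_solve; infer_instance

def pvWitness_solve : List Int × Int := ([3, 10, 4], 3)

def Spec_solve (A : List Int) (n1 : Int) (out : Int) : Prop := out = solve_alt A n1
instance (A : List Int) (n1 : Int) (out : Int) : Decidable (Spec_solve A n1 out) := by unfold Spec_solve; infer_instance

-- ===== CLAIM (what is proved, stated in full; the proofs are below) =====
def Claim_equal_solve : Prop := ∀ (A : List Int) (n1 : Int), Dom_solve A n1 → Pre_solve A n1 → Spec_solve A n1 (solve A n1)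

-- ===== LEMMAS AND PROOFS =====

-- the pair value A computes: smaller % larger (ties: y % x)
def pvPair (x y : Int) : Int :=
  if y > x then PySem.Int.mod x y else PySem.Int.mod y x

-- generic facts about running-max style folds
theorem pvFoldGe {α : Type} (f : Int → α → Int) (h : ∀ m x, m ≤ f m x) :
    ∀ (l : List α) (m : Int), m ≤ l.foldl f m := by
  intro l
  induction l with
  | nil => intro m; simp
  | cons x t ih => intro m; exact le_trans (h m x) (ih (f m x))

theorem pvFoldReach {α : Type} (f : Int → α → Int) (h : ∀ m x, m ≤ f m x)
    (t : Int) (x : α) (ht : ∀ m, t ≤ f m x) :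
    ∀ (l : List α) (m : Int), x ∈ l → t ≤ l.foldl f m := by
  intro l
  induction l with
  | nil => intro m hx; cases hx
  | cons y ys ih =>
    intro m hx
    rcases List.mem_cons.mp hx with h1 | h2
    · subst h1
      exact le_trans (ht m) (pvFoldGe f h ys (f m x))
    · exact ih (f m y) h2

theorem pvFoldLe {α : Type} (f : Int → α → Int) (B : Int) :
    ∀ (l : List α) (m : Int), (∀ m' x, x ∈ l → m' ≤ B → f m' x ≤ B) → m ≤ B →
      l.foldl f m ≤ B := by
  intro l
  induction l with
  | nil => intro m _ hm; simpa using hm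
  | cons x t ih =>
    intro m h hm
    exact ih (f m x) (fun m' y hy hm' => h m' y (List.mem_cons_of_mem x hy) hm')
      (h m x (List.mem_cons_self) hm)

theorem pv_small (l : List Int) (h : l.length < 2) : ∀ x ∈ l, ∀ y ∈ l, x = y := by
  cases l with
  | nil => simp
  | cons a t =>
    cases t with
    | nil => simp
    | cons b s => simp at h

-- element access in the prefix
theorem pvGetL (A : List Int) (n1 : Int) (hn : n1 ≤ (A.length : Int)) (i : Int)
    (h0 : 0 ≤ i) (h1 : i < n1) (h2 : i.toNat < (A.take n1.toNat).length) :
    PySem.List.pyGetD A i 0 = (A.take n1.toNat)[i.toNat] := by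
  rw [PySem.List.pyGetD_eq_getElem A 0 h0 (by omega)]
  rw [List.getElem_take]

theorem pv_solve_nonneg (A : List Int) (n1 : Int) : 0 ≤ solve A n1 := by
  unfold solve
  apply pvFoldGe
  intro m i
  apply pvFoldGe
  intro m' j
  dsimp only
  split_ifs <;> omega

theorem pv_solve_le (A : List Int) (n1 : Int) (hn : n1 ≤ (A.length : Int)) (B : Int)
    (hB0 : 0 ≤ B)
    (hB : ∀ x y, x ∈ A.take n1.toNat → y ∈ A.take n1.toNat → (x ≠ 0 ∨ y ≠ 0) →
      pvPair x y ≤ B) :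
    solve A n1 ≤ B := by
  unfold solve
  apply pvFoldLe _ _ _ _ _ hB0
  intro m i hi hm
  apply pvFoldLe _ _ _ _ _ hm
  intro m' j hj hm'
  have hi' := (PySem.List.mem_pyRange_one).mp hi
  have hj' := (PySem.List.mem_pyRange_one).mp hj
  have hlen : (A.take n1.toNat).length = min n1.toNat A.length := by simp
  have hiL : i.toNat < (A.take n1.toNat).length := by omega
  have hjL : j.toNat < (A.take n1.toNat).length := by omega
  rw [pvGetL A n1 hn i (by omega) (by omega) hiL, pvGetL A n1 hn j (by omega) (by omega) hjL]
  by_cases hg : (A.take n1.toNat)[i.toNat] ≠ 0 ∨ (A.take n1.toNat)[j.toNat] ≠ 0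
  · rw [if_pos hg]
    have hP := hB _ _ (List.getElem_mem hiL) (List.getElem_mem hjL) hg
    unfold pvPair at hP
    dsimp only
    split_ifs at hP ⊢ <;> omega
  · rw [if_neg hg]
    exact hm'

theorem pv_solve_reach (A : List Int) (n1 : Int) (hn : n1 ≤ (A.length : Int))
    (i j : Nat) (hij : i < j) (hj : j < (A.take n1.toNat).length)
    (hg : (A.take n1.toNat)[i]'(by omega) ≠ 0 ∨ (A.take n1.toNat)[j] ≠ 0) :
    pvPair ((A.take n1.toNat)[i]'(by omega)) ((A.take n1.toNat)[j]) ≤ solve A n1 := by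
  have hlen : (A.take n1.toNat).length = min n1.toNat A.length := by simp
  have hjn : (j : Int) < n1 := by omega
  have hin : (i : Int) < n1 := by omega
  unfold solve
  apply pvFoldReach _ ?hmono _ (i : Int) ?ht _ _ ?hmem
  case hmono =>
    intro m x
    apply pvFoldGe
    intro m' y
    dsimp only
    split_ifs <;> omega
  case hmem => exact (PySem.List.mem_pyRange_one).mpr ⟨by omega, hin⟩
  case ht =>
    intro m
    apply pvFoldReach _ ?hmono2 _ (j : Int) ?ht2 _ _ ?hmem2
    case hmono2 =>
      intro m' y
      dsimp only
      split_ifs <;> omega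
    case hmem2 => exact (PySem.List.mem_pyRange_one).mpr ⟨by omega, hjn⟩
    case ht2 =>
      intro m'
      have hgi : PySem.List.pyGetD A (i : Int) 0 = (A.take n1.toNat)[i]'(by omega) := by
        have := pvGetL A n1 hn (i : Int) (by omega) hin (by omega)
        simpa using this
      have hgj : PySem.List.pyGetD A (j : Int) 0 = (A.take n1.toNat)[j] := by
        have := pvGetL A n1 hn (j : Int) (by omega) hjn (by omega)
        simpa using this
      rw [hgi, hgj]
      rw [if_pos hg]
      unfold pvPair
      dsimp only
      split_ifs <;> omega

theorem pv_mod_self (x : Int) : PySem.Int.mod x x = 0 :=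
  (PySem.Int.mod_eq_zero_iff_dvd x x).mpr dvd_rfl

theorem pv_mod_small (y M : Int) (h0 : 0 ≤ y) (h1 : y < M) : PySem.Int.mod y M = y := by
  rw [PySem.Int.mod_eq_emod_of_pos (by omega : (0:Int) < M)]
  exact Int.emod_eq_of_lt h0 h1

-- ===== VERDICT (by name: the statement is the Claim_ definition above) =====
theorem solve_spec : Claim_equal_solve := by
  intro A n1 _ hpre
  obtain ⟨hn, hzero⟩ := hpre
  unfold Spec_solve solve_alt
  have hL : (if n1 > 0 then PySem.List.slice A none (some n1) else []) = A.take n1.toNat := by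
    split_ifs with h
    · exact PySem.List.slice_to A (by omega)
    · rw [Int.toNat_of_nonpos (by omega)]
      simp
  rw [hL]
  by_cases h2 : (A.take n1.toNat).length < 2
  · -- fewer than two elements: both sides are 0
    rw [if_pos h2]
    have hle : solve A n1 ≤ 0 := by
      apply pv_solve_le A n1 hn 0 le_rfl
      intro x y hx hy _
      have hxy : x = y := pv_small _ h2 x hx y hy
      subst hxy
      simp [pvPair, pv_mod_self]
    have := pv_solve_nonneg A n1
    omega
  · rw [if_neg h2]
    have hLne : A.take n1.toNat ≠ [] := by
      intro h
      rw [h] at h2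
      simp at h2
    obtain ⟨M, hM⟩ : ∃ M, PySem.List.max? (A.take n1.toNat) (fun y => y) = some M := by
      cases hc : PySem.List.max? (A.take n1.toNat) (fun y => y) with
      | none => exact absurd ((PySem.List.max?_eq_none_iff _ _).mp hc) hLne
      | some m => exact ⟨m, rfl⟩
    have hMmem : M ∈ A.take n1.toNat := PySem.List.max?_mem hM
    have hMmax : ∀ y ∈ A.take n1.toNat, y ≤ M := PySem.List.max?_isMax hM
    rw [hM]
    simp only [Option.getD_some]
    by_cases hMp : M ≤ 0
    · -- maximum nonpositive: both sides are 0
      rw [if_pos hMp]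
      have hle : solve A n1 ≤ 0 := by
        apply pv_solve_le A n1 hn 0 le_rfl
        intro x y hx hy hg
        have hxM := hMmax x hx
        have hyM := hMmax y hy
        unfold pvPair
        split_ifs with hlt
        · rcases lt_trichotomy y 0 with hy0 | hy0 | hy0
          · exact (PySem.Int.mod_neg_bounds x hy0).2
          · subst hy0
            have := hzero hy x hx
            omega
          · omega
        · rcases lt_trichotomy x 0 with hx0 | hx0 | hx0
          · exact (PySem.Int.mod_neg_bounds y hx0).2
          · subst hx0
            have hy0 : y ≠ 0 := by tauto
            have := hzero hx y hy
            omega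
          · omega
      have := pv_solve_nonneg A n1
      omega
    · rw [if_neg hMp]
      have hMpos : 0 < M := by omega
      obtain ⟨V, hV⟩ : ∃ V, PySem.List.max?
          ((A.take n1.toNat).map (fun x => PySem.Int.mod x M)) (fun y => y) = some V := by
        cases hc : PySem.List.max? ((A.take n1.toNat).map (fun x => PySem.Int.mod x M))
            (fun y => y) with
        | none =>
          have := (PySem.List.max?_eq_none_iff _ _).mp hc
          exact absurd (List.map_eq_nil_iff.mp this) hLne
        | some m => exact ⟨m, rfl⟩
      rw [hV]
      simp only [Option.getD_some]
      have hVmem := PySem.List.max?_mem hV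
      obtain ⟨y0, hy0L, hy0V⟩ := List.mem_map.mp hVmem
      have hVmax : ∀ y ∈ A.take n1.toNat, PySem.Int.mod y M ≤ V := by
        intro y hy
        exact PySem.List.max?_isMax hV _ (List.mem_map.mpr ⟨y, hy, rfl⟩)
      have hV0 : 0 ≤ V := hy0V ▸ PySem.Int.mod_nonneg y0 hMpos
      apply le_antisymm
      · -- every pair value of A is dominated by some x % M
        apply pv_solve_le A n1 hn V hV0
        intro x y hx hy hg
        unfold pvPair
        split_ifs with hlt
        · rcases lt_trichotomy y 0 with hc | hc | hc
          · exact le_trans (PySem.Int.mod_neg_bounds x hc).2 hV0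
          · subst hc
            have := hzero hy x hx
            omega
          · by_cases hyM : y = M
            · subst hyM
              exact hVmax x hx
            · have hylt : y < M := lt_of_le_of_ne (hMmax y hy) hyM
              have hm1 := PySem.Int.mod_lt x hc
              have hm2 := pv_mod_small y M (by omega) hylt
              have hm3 := hVmax y hy
              omega
        · rcases lt_trichotomy x 0 with hc | hc | hc
          · exact le_trans (PySem.Int.mod_neg_bounds y hc).2 hV0
          · subst hc
            have hy0 : y ≠ 0 := by tauto
            have := hzero hx y hy
            omega
          · by_cases hxM : x = M
            · subst hxM
              exact hVmax y hy
            · have hxlt : x < M := lt_of_le_of_ne (hMmax x hx) hxM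
              have hm1 := PySem.Int.mod_lt y hc
              have hm2 := pv_mod_small x M (by omega) hxlt
              have hm3 := hVmax x hx
              omega
      · -- B's value y0 % M is realised by A on the pair (y0, M)
        rw [← hy0V]
        by_cases hy0M : y0 = M
        · subst hy0M
          rw [pv_mod_self]
          exact pv_solve_nonneg A n1
        · have hy0lt : y0 < M := lt_of_le_of_ne (hMmax y0 hy0L) hy0M
          obtain ⟨i, hi, hiv⟩ := List.mem_iff_getElem.mp hy0L
          obtain ⟨k, hk, hkv⟩ := List.mem_iff_getElem.mp hMmem
          have hik : i ≠ k := by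
            intro h
            subst h
            rw [hiv] at hkv
            exact hy0M hkv
          rcases Nat.lt_or_ge i k with hlt | hge
          · have hr := pv_solve_reach A n1 hn i k hlt hk (by rw [hiv, hkv]; right; omega)
            rw [hiv, hkv] at hr
            unfold pvPair at hr
            rw [if_pos (by omega)] at hr
            exact hr
          · have hki : k < i := by omega
            have hr := pv_solve_reach A n1 hn k i hki hi (by rw [hiv, hkv]; left; omega)
            rw [hiv, hkv] at hr
            unfold pvPair at hr
            rw [if_neg (by omega)] at hr
            exact hr
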